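-- pv_equiv track=rewrite | github.com/bcbabrich/decisionTreeClassifier | decisionTreeClassifier_1.py | unAmbig
-- ===== SOURCE A (Python) =====
-- def unAmbig(dataArray, labels) :
--     for l in labels :
--         unAmbig = True
--         for i in range(len(dataArray)) :
--             if dataArray[i][len(dataArray[0]) - 1].rstrip() != l :
--                 unAmbig = False
--         if unAmbig :
--             return l
--     return 'NULL'
-- ===== SOURCE B (Python) =====
-- def unAmbig(dataArray, labels):
--     if not labels:
--         return 'NULL'
--     lastVals = set(row[len(dataArray[0]) - 1].rstrip() for row in dataArray)
--     for l in labels: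
--         if lastVals <= {l}:
--             return l
--     return 'NULL'
-- ===== Notes on version B (the rewrite author's own statement) =====
-- stated objective: faster
-- what changed: B builds the set of distinct rstripped last-column values in one pass and scans labels with a subset test, instead of A's rescan of every row for each label.
import Mathlib
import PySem

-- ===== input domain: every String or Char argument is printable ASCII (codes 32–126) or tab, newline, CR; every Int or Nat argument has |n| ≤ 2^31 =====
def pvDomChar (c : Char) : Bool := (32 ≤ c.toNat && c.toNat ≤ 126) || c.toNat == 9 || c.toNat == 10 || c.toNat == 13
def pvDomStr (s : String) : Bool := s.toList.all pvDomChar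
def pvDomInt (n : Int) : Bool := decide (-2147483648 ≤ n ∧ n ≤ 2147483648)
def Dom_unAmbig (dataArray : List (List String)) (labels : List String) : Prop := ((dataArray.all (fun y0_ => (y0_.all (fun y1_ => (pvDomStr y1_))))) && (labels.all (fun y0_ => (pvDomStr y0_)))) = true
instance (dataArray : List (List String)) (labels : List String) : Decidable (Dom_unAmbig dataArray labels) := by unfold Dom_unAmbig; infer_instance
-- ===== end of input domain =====

-- B builds the set of distinct (rstripped) last-column values once and scans labels with a
-- subset test, instead of A's rescan of every row for each label (objective: faster, one pass over the rows).

-- ===== PORT A =====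
-- A's outer 'for l in labels' with its early return
def unAmbigGo (dataArray : List (List String)) : List String → String
  | [] => "NULL"
  | l :: rest =>
    let flag := (PySem.List.pyRange 0 (dataArray.length : Int) 1).foldl
      (fun flag i =>
        if PySem.Str.rstrip (PySem.List.pyGetD (PySem.List.pyGetD dataArray i [])
            (((PySem.List.pyGetD dataArray 0 []).length : Int) - 1) "") ≠ l then false else flag) true
    if flag then l else unAmbigGo dataArray rest

def unAmbig (dataArray : List (List String)) (labels : List String) : String :=
  unAmbigGo dataArray labels

-- ===== PORT B =====
-- B's 'for l in labels' over the prebuilt set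
def unAmbigAltGo (lastVals : PySem.Set String) : List String → String
  | [] => "NULL"
  | l :: rest => if PySem.Set.issubset lastVals [l] then l else unAmbigAltGo lastVals rest

def unAmbig_alt (dataArray : List (List String)) (labels : List String) : String :=
  if labels = [] then "NULL"
  else
    let lastVals : PySem.Set String := PySem.Set.ofList (dataArray.map (fun row => PySem.Str.rstrip (PySem.List.pyGetD row (((PySem.List.pyGetD dataArray 0 []).length : Int) - 1) "")))
    unAmbigAltGo lastVals labels

-- ===== PRECONDITION & SPEC =====
-- Pre_ excludes exactly the inputs where Python A raises an IndexError: labels and dataArray both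
-- nonempty while some row lacks the column len(dataArray[0]) - 1 (Python negative-index rules).
def Pre_unAmbig (dataArray : List (List String)) (labels : List String) : Prop :=
  labels = [] ∨ dataArray = [] ∨
    ∀ row ∈ dataArray, PySem.Raise.InRange row.length (((PySem.List.pyGetD dataArray 0 []).length : Int) - 1)
instance (dataArray : List (List String)) (labels : List String) : Decidable (Pre_unAmbig dataArray labels) := by unfold Pre_unAmbig; infer_instance

def pvWitness_unAmbig : List (List String) × List String := ([["x", "a "], ["y", "a"]], ["b", "a"])

def Spec_unAmbig (dataArray : List (List String)) (labels : List String) (out : String) : Prop := out = unAmbig_alt dataArray labels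
instance (dataArray : List (List String)) (labels : List String) (out : String) : Decidable (Spec_unAmbig dataArray labels out) := by unfold Spec_unAmbig; infer_instance

-- ===== CLAIM (what is proved, stated in full; the proofs are below) =====
def Claim_equal_unAmbig : Prop := ∀ (dataArray : List (List String)) (labels : List String), Dom_unAmbig dataArray labels → Pre_unAmbig dataArray labels → Spec_unAmbig dataArray labels (unAmbig dataArray labels)

-- ===== LEMMAS AND PROOFS =====

-- A's inner flag loop: false survives only if no row mismatches
theorem flag_foldl (v : List String → String) (l : String) (data : List (List String)) (b : Bool) :
    data.foldl (fun flag row => if v row ≠ l then false else flag) b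
      = (b && data.all (fun row => v row == l)) := by
  induction data generalizing b with
  | nil => simp
  | cons r rs ih =>
    simp only [List.foldl_cons, List.all_cons, ih]
    by_cases h : v r = l <;> simp [h]

-- A's per-label condition equals B's subset test
theorem cond_eq (dataArray : List (List String)) (l : String) :
    ((PySem.List.pyRange 0 (dataArray.length : Int) 1).foldl
      (fun flag i =>
        if PySem.Str.rstrip (PySem.List.pyGetD (PySem.List.pyGetD dataArray i [])
            (((PySem.List.pyGetD dataArray 0 []).length : Int) - 1) "") ≠ l then false else flag) true)
    = PySem.Set.issubset (PySem.Set.ofList (dataArray.map (fun row => PySem.Str.rstrip (PySem.List.pyGetD row (((PySem.List.pyGetD dataArray 0 []).length : Int) - 1) "")))) [l] := by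
  rw [show ((dataArray.length : Int)) = PySem.List.len dataArray from rfl,
    PySem.List.foldl_pyRange_zero_pyGetD (f := fun flag row => if PySem.Str.rstrip (PySem.List.pyGetD row (((PySem.List.pyGetD dataArray 0 []).length : Int) - 1) "") ≠ l then false else flag)]
  rw [flag_foldl]
  rcases h : PySem.Set.issubset (PySem.Set.ofList (dataArray.map (fun row => PySem.Str.rstrip (PySem.List.pyGetD row (((PySem.List.pyGetD dataArray 0 []).length : Int) - 1) "")))) [l] with _ | _
  · rw [Bool.eq_false_iff]
    intro hall
    rw [Bool.eq_false_iff] at h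
    apply h
    rw [PySem.Set.issubset_iff]
    intro x hx
    have hx' := (PySem.Set.mem_ofList _ _).mp hx
    simp only [List.mem_map] at hx'
    obtain ⟨row, hrow, rfl⟩ := hx'
    simp only [Bool.true_and, List.all_eq_true] at hall
    simpa using (hall row hrow)
  · rw [PySem.Set.issubset_iff] at h
    simp only [Bool.true_and, List.all_eq_true]
    intro row hrow
    have : PySem.Str.rstrip (PySem.List.pyGetD row (((PySem.List.pyGetD dataArray 0 []).length : Int) - 1) "") ∈ [l] := by
      apply h
      exact (PySem.Set.mem_ofList _ _).mpr (List.mem_map_of_mem hrow)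
    simpa using this

-- the two label loops agree
theorem go_eq (dataArray : List (List String)) (labels : List String) :
    unAmbigGo dataArray labels
      = unAmbigAltGo (PySem.Set.ofList (dataArray.map (fun row => PySem.Str.rstrip (PySem.List.pyGetD row (((PySem.List.pyGetD dataArray 0 []).length : Int) - 1) "")))) labels := by
  induction labels with
  | nil => rfl
  | cons l rest ih =>
    simp only [unAmbigGo, unAmbigAltGo, cond_eq, ih]

-- ===== VERDICT (by name: the statement is the Claim_ definition above) =====
theorem unAmbig_spec : Claim_equal_unAmbig := by
  intro dataArray labels _ _
  unfold Spec_unAmbig unAmbig unAmbig_alt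
  rcases labels with _ | ⟨l, rest⟩
  · rfl
  · simp only [go_eq, if_neg (List.cons_ne_nil l rest)]
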